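-- pv_equiv track=rewrite | github.com/MineTN/WritingForMachines | experiment.py | add_symbols
-- ===== SOURCE A (Python) =====
-- def add_symbols(text: str) -> str:
--     """Sembolik ifadeler ekle (makale önerisi — iyi yön)"""
--     replacements = {
--         "greater than or equal to": "≥",
--         "less than or equal to": "≤",
--         "not equal to": "≠",
--         "approximately": "≈",
--         "one half": "½",
--         "one quarter": "¼",
--         "therefore": "∴",
--         "implies": "→",
--         "and": "&",
--         "section": "§",
--         "degree": "°",
--     }
--     for phrase, sym in replacements.items():
--         text = text.replace(phrase, sym)
--     return text
-- ===== SOURCE B (Python) =====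
-- def add_symbols(text: str) -> str:
--     """Sembolik ifadeler ekle (makale önerisi — iyi yön)"""
--     phrases = [
--         "greater than or equal to",
--         "less than or equal to",
--         "not equal to",
--         "approximately",
--         "one half",
--         "one quarter",
--         "therefore",
--         "implies",
--         "and",
--         "section",
--         "degree",
--     ]
--     symbols = "≥≤≠≈½¼∴→&§°"
--
--     def sub(i: int, s: str) -> str:
--         if i == len(phrases):
--             return s
--         return symbols[i].join(sub(i + 1, piece) for piece in s.split(phrases[i]))
--
--     return sub(0, text)
-- ===== Notes on version B (the rewrite author's own statement) =====
-- stated objective: alternative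
-- what changed: Replaces the eleven sequential whole-string replace() rewrites by a recursion over two parallel sequences (a phrase list and a symbol string): split the text on the current phrase, recurse on each fragment with the remaining phrases, and join with the symbol, so later phrases only scan untouched fragments and never rescan inserted symbols.
import Mathlib
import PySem

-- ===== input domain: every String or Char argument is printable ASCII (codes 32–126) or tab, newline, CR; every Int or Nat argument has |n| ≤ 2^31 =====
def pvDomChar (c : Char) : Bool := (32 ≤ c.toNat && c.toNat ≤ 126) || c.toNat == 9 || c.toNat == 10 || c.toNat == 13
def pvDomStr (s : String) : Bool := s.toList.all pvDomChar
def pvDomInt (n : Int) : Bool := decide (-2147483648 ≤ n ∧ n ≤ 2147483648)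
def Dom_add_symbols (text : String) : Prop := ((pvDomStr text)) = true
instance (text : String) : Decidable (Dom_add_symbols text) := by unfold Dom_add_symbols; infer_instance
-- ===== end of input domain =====

-- B replaces A's eleven sequential whole-string .replace() rewrites by a recursion over two parallel
-- sequences (phrase list + symbol string): split on the current phrase, recurse on each fragment with
-- the remaining phrases, join with the symbol — an alternative decomposition of the same cost,
-- proved to return the same string.


-- ===== PORT A =====
-- the replacements dict, in Python insertion order
def pvReplacements : List (String × String) :=
  [("greater than or equal to", "≥"),
   ("less than or equal to", "≤"),
   ("not equal to", "≠"),
   ("approximately", "≈"),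
   ("one half", "½"),
   ("one quarter", "¼"),
   ("therefore", "∴"),
   ("implies", "→"),
   ("and", "&"),
   ("section", "§"),
   ("degree", "°")]

-- A: for phrase, sym in replacements.items(): text = text.replace(phrase, sym)
def add_symbols (text : String) : String :=
  pvReplacements.foldl (fun t pr => PySem.Str.replace t pr.1 pr.2) text

-- ===== PORT B =====
-- B's phrase list; spelled at character level (the exact characters of Source B's string literals),
-- because B's split/join work character-wise (PySem.Chars).
def pvPhrasesB : List (List Char) :=
  [['g', 'r', 'e', 'a', 't', 'e', 'r', ' ', 't', 'h', 'a', 'n', ' ', 'o', 'r', ' ', 'e', 'q', 'u', 'a', 'l', ' ', 't', 'o'],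
   ['l', 'e', 's', 's', ' ', 't', 'h', 'a', 'n', ' ', 'o', 'r', ' ', 'e', 'q', 'u', 'a', 'l', ' ', 't', 'o'],
   ['n', 'o', 't', ' ', 'e', 'q', 'u', 'a', 'l', ' ', 't', 'o'],
   ['a', 'p', 'p', 'r', 'o', 'x', 'i', 'm', 'a', 't', 'e', 'l', 'y'],
   ['o', 'n', 'e', ' ', 'h', 'a', 'l', 'f'],
   ['o', 'n', 'e', ' ', 'q', 'u', 'a', 'r', 't', 'e', 'r'],
   ['t', 'h', 'e', 'r', 'e', 'f', 'o', 'r', 'e'],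
   ['i', 'm', 'p', 'l', 'i', 'e', 's'],
   ['a', 'n', 'd'],
   ['s', 'e', 'c', 't', 'i', 'o', 'n'],
   ['d', 'e', 'g', 'r', 'e', 'e']]

-- B's symbol string "≥≤≠≈½¼∴→&§°", as its characters
def pvSymbolsB : List Char := ['≥', '≤', '≠', '≈', '½', '¼', '∴', '→', '&', '§', '°']

-- B's sub(i, s): symbols[i].join(sub(i+1, piece) for piece in s.split(phrases[i]));
-- the index i is realised by walking the two parallel lists.
def pvSubB : List (List Char) → List Char → List Char → List Char
  | [], _, s => s
  | _ :: _, [], s => s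
  | p :: ps, sy :: sys, s =>
      PySem.Chars.join [sy] ((PySem.Chars.splitOn s p).map (pvSubB ps sys))

def add_symbols_alt (text : String) : String :=
  String.ofList (pvSubB pvPhrasesB pvSymbolsB text.toList)

-- ===== PRECONDITION & SPEC =====
def Spec_add_symbols (text : String) (out : String) : Prop := out = add_symbols_alt text
instance (text : String) (out : String) : Decidable (Spec_add_symbols text out) := by unfold Spec_add_symbols; infer_instance

-- ===== CLAIM (what is proved, stated in full; the proofs are below) =====
def Claim_equal_add_symbols : Prop := ∀ (text : String), Dom_add_symbols text → Spec_add_symbols text (add_symbols text)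

-- ===== LEMMAS AND PROOFS =====

-- simple structural versions of Python's replace / split (for nonempty pattern)
def pvRepl (old new : List Char) : List Char → List Char
  | [] => []
  | c :: t =>
      if h : old ≠ [] ∧ old.isPrefixOf (c :: t) then new ++ pvRepl old new ((c :: t).drop old.length)
      else c :: pvRepl old new t
termination_by l => l.length
decreasing_by
  · simp only [List.length_drop, List.length_cons]
    have : old.length ≥ 1 := by cases old with | nil => exact absurd rfl h.1 | cons a b => simp
    omega
  · simp

def pvSplt (sep : List Char) : List Char → List (List Char)
  | [] => [[]]
  | c :: t =>
      if h : sep ≠ [] ∧ sep.isPrefixOf (c :: t) then [] :: pvSplt sep ((c :: t).drop sep.length)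
      else (pvSplt sep t).modifyHead (c :: ·)
termination_by l => l.length
decreasing_by
  · simp only [List.length_drop, List.length_cons]
    have : sep.length ≥ 1 := by cases sep with | nil => exact absurd rfl h.1 | cons a b => simp
    omega
  · simp

theorem pvSplt_ne_nil (sep l : List Char) : pvSplt sep l ≠ [] := by
  induction l using pvSplt.induct sep with
  | case1 => simp [pvSplt]
  | case2 c t h ih => simp [pvSplt, h]
  | case3 c t h ih =>
      rw [pvSplt]; simp only [dif_neg h]
      cases hx : pvSplt sep t with
      | nil => exact absurd hx ih
      | cons a b => simp

-- PySem's fuel-based replace.go computes pvRepl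
theorem pvReplace_go_eq (old new : List Char) (hold : old ≠ []) :
    ∀ (fuel : Nat) (l acc : List Char), l.length ≤ fuel →
      PySem.Chars.replace.go old new fuel l acc = acc.reverse ++ pvRepl old new l := by
  intro fuel
  induction fuel with
  | zero =>
      intro l acc hl
      have hnil : l = [] := by cases l <;> simp_all
      subst hnil
      simp [PySem.Chars.replace.go, pvRepl]
  | succ n ih =>
      intro l acc hl
      cases l with
      | nil => simp [PySem.Chars.replace.go, pvRepl]
      | cons c t =>
          by_cases hp : old.isPrefixOf (c :: t)
          · have hlen : old.length ≥ 1 := by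
              cases old with | nil => exact absurd rfl hold | cons a b => simp
            have hdrop : ((c :: t).drop old.length).length ≤ n := by
              simp only [List.length_drop, List.length_cons]
              simp only [List.length_cons] at hl
              omega
            rw [PySem.Chars.replace.go, if_pos hp, ih _ _ hdrop, pvRepl, dif_pos ⟨hold, hp⟩]
            simp
          · have ht : t.length ≤ n := by simp only [List.length_cons] at hl; omega
            rw [PySem.Chars.replace.go, if_neg hp, ih _ _ ht, pvRepl, dif_neg (by simp [hp])]
            simp

theorem pvChars_replace_eq (old new s : List Char) (hold : old ≠ []) :
    PySem.Chars.replace s old new = pvRepl old new s := by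
  rw [PySem.Chars.replace, if_neg (by simpa [List.isEmpty_iff] using hold)]
  simpa using pvReplace_go_eq old new hold s.length s [] le_rfl

-- PySem's fuel-based splitOn.go computes pvSplt
theorem pvSplitOn_go_eq (sep : List Char) (hsep : sep ≠ []) :
    ∀ (fuel : Nat) (l cur : List Char) (acc : List (List Char)), l.length ≤ fuel →
      PySem.Chars.splitOn.go sep fuel l cur acc
        = acc.reverse ++ (pvSplt sep l).modifyHead (cur.reverse ++ ·) := by
  intro fuel
  induction fuel with
  | zero =>
      intro l cur acc hl
      have hnil : l = [] := by cases l <;> simp_all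
      subst hnil
      simp [PySem.Chars.splitOn.go, pvSplt]
  | succ n ih =>
      intro l cur acc hl
      cases l with
      | nil => simp [PySem.Chars.splitOn.go, pvSplt]
      | cons c t =>
          by_cases hp : sep.isPrefixOf (c :: t)
          · have hlen : sep.length ≥ 1 := by
              cases sep with | nil => exact absurd rfl hsep | cons a b => simp
            have hdrop : ((c :: t).drop sep.length).length ≤ n := by
              simp only [List.length_drop, List.length_cons]
              simp only [List.length_cons] at hl
              omega
            rw [PySem.Chars.splitOn.go, if_pos hp, ih _ _ _ hdrop, pvSplt, dif_pos ⟨hsep, hp⟩]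
            cases hx : pvSplt sep ((c :: t).drop sep.length) with
            | nil => exact absurd hx (pvSplt_ne_nil _ _)
            | cons a b => simp
          · have ht : t.length ≤ n := by simp only [List.length_cons] at hl; omega
            rw [PySem.Chars.splitOn.go, if_neg hp, ih _ _ _ ht, pvSplt, dif_neg (by simp [hp])]
            cases hx : pvSplt sep t with
            | nil => simp
            | cons a b => simp

theorem pvChars_splitOn_eq (sep s : List Char) (hsep : sep ≠ []) :
    PySem.Chars.splitOn s sep = pvSplt sep s := by
  rw [PySem.Chars.splitOn, pvSplitOn_go_eq sep hsep (s.length + 1) s [] [] (by omega)]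
  cases hx : pvSplt sep s with
  | nil => exact absurd hx (pvSplt_ne_nil _ _)
  | cons a b => simp

-- join of a list whose head got chars pushed on
theorem pvJoin_modifyHead (sep : List Char) (c : Char) (X : List (List Char)) (hX : X ≠ []) :
    PySem.Chars.join sep (X.modifyHead (c :: ·)) = c :: PySem.Chars.join sep X := by
  cases X with
  | nil => exact absurd rfl hX
  | cons x xs =>
      cases xs with
      | nil => simp [PySem.Chars.join_singleton]
      | cons y ys => simp [PySem.Chars.join_cons_cons]

-- replace = join of split
theorem pvRepl_join_splt (old new l : List Char) (hold : old ≠ []) :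
    pvRepl old new l = PySem.Chars.join new (pvSplt old l) := by
  induction l using pvSplt.induct old with
  | case1 => simp [pvRepl, pvSplt, PySem.Chars.join_singleton]
  | case2 c t h ih =>
      rw [pvRepl, dif_pos h, pvSplt, dif_pos h]
      cases hx : pvSplt old ((c :: t).drop old.length) with
      | nil => exact absurd hx (pvSplt_ne_nil _ _)
      | cons a b =>
          rw [PySem.Chars.join_cons_cons]
          rw [ih, hx]
          simp
  | case3 c t h ih =>
      rw [pvRepl, dif_neg h, pvSplt, dif_neg h, pvJoin_modifyHead _ _ _ (pvSplt_ne_nil _ _), ih]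

-- a pattern containing no b cannot match across a b boundary
theorem pvPrefix_cut {old u v : List Char} {b : Char} (hb : b ∉ old)
    (h : old.isPrefixOf (u ++ b :: v)) : old.isPrefixOf u ∧ old.length ≤ u.length := by
  rw [List.isPrefixOf_iff_prefix] at h ⊢
  obtain ⟨t, ht⟩ := h
  have hlen : old.length ≤ u.length := by
    by_contra hlt
    push_neg at hlt
    have hlt2 : u.length < (old ++ t).length := by rw [ht]; simp
    have h1 : (old ++ t)[u.length]'hlt2 = b := by
      simp only [ht]
      rw [List.getElem_append_right (by omega)]
      simp
    have h2 : (old ++ t)[u.length]'hlt2 = old[u.length]'hlt := by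
      rw [List.getElem_append_left hlt]
    exact hb (h1 ▸ h2 ▸ List.getElem_mem hlt)
  refine ⟨?_, hlen⟩
  have h3 : old = (u ++ b :: v).take old.length := by
    rw [← ht, List.take_left]
  have h4 : (u ++ b :: v).take old.length = u.take old.length := by
    rw [List.take_append_of_le_length hlen]
  rw [h3, h4]
  exact List.take_prefix _ _

theorem pvRepl_append_cons (old new : List Char) (hold : old ≠ []) {b : Char} (hb : b ∉ old) :
    ∀ u v, pvRepl old new (u ++ b :: v) = pvRepl old new u ++ b :: pvRepl old new v := by
  have H : ∀ (n : Nat) (u : List Char), u.length = n → ∀ v,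
      pvRepl old new (u ++ b :: v) = pvRepl old new u ++ b :: pvRepl old new v := by
    intro n
    induction n using Nat.strong_induction_on with
    | _ n ih =>
      intro u hu v
      cases u with
      | nil =>
          have hnp : ¬ old.isPrefixOf (b :: v) := by
            intro hpre
            rw [List.isPrefixOf_iff_prefix] at hpre
            cases old with
            | nil => exact hold rfl
            | cons o os =>
                obtain ⟨t, ht⟩ := hpre
                have : o = b := by simpa using congrArg (fun l => l.head?) ht
                exact hb (by simp [this])
          have hstep : pvRepl old new (b :: v) = b :: pvRepl old new v := by
            rw [pvRepl, dif_neg (by simp [hnp])]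
          simp [hstep, pvRepl]
      | cons c t =>
          by_cases hp : old.isPrefixOf (c :: t ++ b :: v)
          · obtain ⟨hpu, hlen⟩ := pvPrefix_cut hb hp
            have hlen1 : old.length ≥ 1 := by
              cases old with | nil => exact absurd rfl hold | cons a b => simp
            have hdropapp : (c :: t ++ b :: v).drop old.length
                = (c :: t).drop old.length ++ b :: v := by
              rw [List.drop_append_of_le_length hlen]
            rw [show c :: t ++ b :: v = (c :: (t ++ b :: v)) by simp]
            rw [pvRepl, dif_pos ⟨hold, by simpa using hp⟩]
            have hrec := ih (((c :: t).drop old.length).length)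
              (by simp only [List.length_drop] at *; omega)
              ((c :: t).drop old.length) rfl v
            rw [show (c :: (t ++ b :: v)).drop old.length
                  = (c :: t).drop old.length ++ b :: v by simpa using hdropapp]
            rw [hrec]
            rw [pvRepl, dif_pos ⟨hold, hpu⟩]
            simp
          · have hnpu : ¬ old.isPrefixOf (c :: t) := by
              intro hc
              apply hp
              rw [List.isPrefixOf_iff_prefix] at hc ⊢
              exact hc.trans (by simp)
            rw [show c :: t ++ b :: v = (c :: (t ++ b :: v)) by simp]
            rw [pvRepl, dif_neg (by simp [show ¬ old.isPrefixOf (c :: (t ++ b :: v)) by simpa using hp])]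
            have := ih t.length (by simp [← hu]) t rfl v
            rw [this, pvRepl, dif_neg (by simp [hnpu])]
            simp
  exact fun u v => H u.length u rfl v

theorem pvRepl_append_block (old new : List Char) (hold : old ≠ []) :
    ∀ (m : List Char), m ≠ [] → (∀ c ∈ m, c ∉ old) →
    ∀ u v, pvRepl old new (u ++ m ++ v) = pvRepl old new u ++ m ++ pvRepl old new v := by
  intro m
  induction m with
  | nil => intro h; exact absurd rfl h
  | cons b m' ih =>
      intro _ hmem u v
      have hb : b ∉ old := hmem b (by simp)
      cases m' with
      | nil => simpa using pvRepl_append_cons old new hold hb u v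
      | cons b' m'' =>
          have h1 : u ++ (b :: b' :: m'') ++ v = u ++ b :: ((b' :: m'') ++ v) := by simp
          rw [h1, pvRepl_append_cons old new hold hb u ((b' :: m'') ++ v)]
          have h2 := ih (by simp) (fun c hc => hmem c (by simp [hc])) [] v
          simp only [List.nil_append] at h2
          rw [h2, pvRepl]
          simp

-- the char-level table and its wellformedness: ASCII nonempty phrases, non-ASCII symbols
def pvGood : List (List Char × List Char) → Prop
  | [] => True
  | (p, s) :: rest => p ≠ [] ∧ s ≠ [] ∧ (∀ c ∈ s, ∀ q ∈ rest, c ∉ q.1) ∧ pvGood rest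

-- A's pipeline at char level
def pvFold (L : List (List Char × List Char)) (t : List Char) : List Char :=
  L.foldl (fun t pr => pvRepl pr.1 pr.2 t) t

-- B's recursion, with the table zipped into pairs
def pvSubC : List (List Char × List Char) → List Char → List Char
  | [], t => t
  | (p, s) :: rest, t => PySem.Chars.join s ((PySem.Chars.splitOn t p).map (pvSubC rest))

theorem pvFold_nil (L : List (List Char × List Char)) : pvFold L [] = [] := by
  induction L with
  | nil => rfl
  | cons pr rest ih => simpa [pvFold, pvRepl] using ih

theorem pvFold_block (L : List (List Char × List Char)) (hL : pvGood L) (m : List Char)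
    (hm : m ≠ []) (hmem : ∀ c ∈ m, ∀ q ∈ L, c ∉ q.1) :
    ∀ x y, pvFold L (x ++ m ++ y) = pvFold L x ++ m ++ pvFold L y := by
  induction L with
  | nil => intro x y; rfl
  | cons pr rest ih =>
      intro x y
      obtain ⟨p, sy⟩ := pr
      obtain ⟨hp1, hs1, hdis, hrest⟩ := hL
      have hstep := pvRepl_append_block p sy hp1 m hm
        (fun c hc => hmem c hc (p, sy) (by simp)) x y
      show pvFold rest (pvRepl p sy (x ++ m ++ y)) = _
      rw [hstep, ih hrest (fun c hc q hq => hmem c hc q (by simp [hq]))]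
      rfl

theorem pvFold_join (L : List (List Char × List Char)) (hL : pvGood L) (sep : List Char)
    (hsep : sep ≠ []) (hmem : ∀ c ∈ sep, ∀ q ∈ L, c ∉ q.1) :
    ∀ pieces, pvFold L (PySem.Chars.join sep pieces)
      = PySem.Chars.join sep (pieces.map (fun x => pvFold L x)) := by
  intro pieces
  induction pieces with
  | nil => simp [PySem.Chars.join_nil, pvFold_nil]
  | cons x rest ih =>
      cases rest with
      | nil => simp [PySem.Chars.join_singleton]
      | cons y ys =>
          rw [PySem.Chars.join_cons_cons, pvFold_block L hL sep hsep hmem, ih]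
          simp only [List.map_cons]
          rw [PySem.Chars.join_cons_cons]

theorem pvMain (L : List (List Char × List Char)) (hL : pvGood L) :
    ∀ t, pvFold L t = pvSubC L t := by
  induction L with
  | nil => intro t; rfl
  | cons pr rest ih =>
      intro t
      obtain ⟨p, s⟩ := pr
      obtain ⟨hp1, hs1, hdis, hrest⟩ := hL
      show pvFold rest (pvRepl p s t) = _
      rw [pvRepl_join_splt p s t hp1,
          pvFold_join rest hrest s hs1 hdis,
          List.map_congr_left (fun x _ => ih hrest x)]
      show _ = PySem.Chars.join s ((PySem.Chars.splitOn t p).map (pvSubC rest))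
      rw [pvChars_splitOn_eq p t hp1]

-- B's parallel-lists recursion computes the zipped-table recursion
theorem pvSubB_eq (ps : List (List Char)) :
    ∀ (sys : List Char) (s : List Char),
      pvSubB ps sys s = pvSubC (ps.zip (sys.map (fun c => [c]))) s := by
  induction ps with
  | nil => intro sys s; simp [pvSubB, pvSubC]
  | cons p ps ih =>
      intro sys s
      cases sys with
      | nil => simp [pvSubB, pvSubC]
      | cons sy sys =>
          simp only [pvSubB, List.map_cons, List.zip_cons_cons, pvSubC]
          congr 1
          exact List.map_congr_left (fun x _ => ih sys x)

-- string-level bridge for A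
theorem pvFold_toList (L : List (String × String)) :
    ∀ (text : String), (∀ pr ∈ L, pr.1.toList ≠ []) →
      (L.foldl (fun t pr => PySem.Str.replace t pr.1 pr.2) text).toList
        = pvFold (L.map (fun pr => (pr.1.toList, pr.2.toList))) text.toList := by
  induction L with
  | nil => intro text _; rfl
  | cons pr rest ih =>
      intro text hL
      show (rest.foldl _ (PySem.Str.replace text pr.1 pr.2)).toList = _
      rw [ih (PySem.Str.replace text pr.1 pr.2) (fun q hq => hL q (by simp [hq]))]
      show _ = pvFold (List.map _ rest) (pvRepl pr.1.toList pr.2.toList text.toList)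
      rw [PySem.Str.toList_replace,
          pvChars_replace_eq _ _ _ (hL pr (by simp))]

-- the common char-level table: A's table mapped through toList = B's phrases zipped with B's symbols
def pvTable : List (List Char × List Char) :=
  pvPhrasesB.zip (pvSymbolsB.map (fun c => [c]))

theorem pvTable_eq :
    pvReplacements.map (fun pr => (pr.1.toList, pr.2.toList)) = pvTable := by
  unfold pvReplacements pvTable pvPhrasesB pvSymbolsB; simp

theorem pvDisj0 : ∀ c ∈ ['≥'], ∀ q ∈ pvTable.drop 1, c ∉ q.1 := by
  intro c hc q hq; fin_cases hc <;> fin_cases hq <;> simp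

theorem pvDisj1 : ∀ c ∈ ['≤'], ∀ q ∈ pvTable.drop 2, c ∉ q.1 := by
  intro c hc q hq; fin_cases hc <;> fin_cases hq <;> simp

theorem pvDisj2 : ∀ c ∈ ['≠'], ∀ q ∈ pvTable.drop 3, c ∉ q.1 := by
  intro c hc q hq; fin_cases hc <;> fin_cases hq <;> simp

theorem pvDisj3 : ∀ c ∈ ['≈'], ∀ q ∈ pvTable.drop 4, c ∉ q.1 := by
  intro c hc q hq; fin_cases hc <;> fin_cases hq <;> simp

theorem pvDisj4 : ∀ c ∈ ['½'], ∀ q ∈ pvTable.drop 5, c ∉ q.1 := by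
  intro c hc q hq; fin_cases hc <;> fin_cases hq <;> simp

theorem pvDisj5 : ∀ c ∈ ['¼'], ∀ q ∈ pvTable.drop 6, c ∉ q.1 := by
  intro c hc q hq; fin_cases hc <;> fin_cases hq <;> simp

theorem pvDisj6 : ∀ c ∈ ['∴'], ∀ q ∈ pvTable.drop 7, c ∉ q.1 := by
  intro c hc q hq; fin_cases hc <;> fin_cases hq <;> simp

theorem pvDisj7 : ∀ c ∈ ['→'], ∀ q ∈ pvTable.drop 8, c ∉ q.1 := by
  intro c hc q hq; fin_cases hc <;> fin_cases hq <;> simp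

theorem pvDisj8 : ∀ c ∈ ['&'], ∀ q ∈ pvTable.drop 9, c ∉ q.1 := by
  intro c hc q hq; fin_cases hc <;> fin_cases hq <;> simp

theorem pvDisj9 : ∀ c ∈ ['§'], ∀ q ∈ pvTable.drop 10, c ∉ q.1 := by
  intro c hc q hq; fin_cases hc <;> fin_cases hq <;> simp

theorem pvDisj10 : ∀ c ∈ ['°'], ∀ q ∈ pvTable.drop 11, c ∉ q.1 := by
  intro c hc q hq
  simp [pvTable, pvPhrasesB, pvSymbolsB] at hq

set_option maxRecDepth 4096 in
theorem pvTable_good : pvGood pvTable := by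
  have d0 := pvDisj0; have d1 := pvDisj1; have d2 := pvDisj2; have d3 := pvDisj3
  have d4 := pvDisj4; have d5 := pvDisj5; have d6 := pvDisj6; have d7 := pvDisj7
  have d8 := pvDisj8; have d9 := pvDisj9; have d10 := pvDisj10
  simp only [pvTable, pvPhrasesB, pvSymbolsB, List.map_cons, List.map_nil,
    List.zip_cons_cons, List.zip_nil_right, List.drop] at d0 d1 d2 d3 d4 d5 d6 d7 d8 d9 d10 ⊢
  simp only [pvGood]
  exact ⟨by simp, by simp, d0, by simp, by simp, d1, by simp, by simp, d2, by simp, by simp, d3,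
    by simp, by simp, d4, by simp, by simp, d5, by simp, by simp, d6, by simp, by simp, d7,
    by simp, by simp, d8, by simp, by simp, d9, by simp, by simp, d10, trivial⟩

theorem pvPhrases_ne : ∀ pr ∈ pvReplacements, pr.1.toList ≠ [] := by
  unfold pvReplacements; simp

-- ===== VERDICT (by name: the statement is the Claim_ definition above) =====
theorem add_symbols_spec : Claim_equal_add_symbols := by
  intro text _
  show add_symbols text = add_symbols_alt text
  have h1 := pvFold_toList pvReplacements text pvPhrases_ne
  rw [pvTable_eq] at h1
  have h3 := pvMain pvTable pvTable_good text.toList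
  have hl : (add_symbols text).toList = (add_symbols_alt text).toList := by
    unfold add_symbols add_symbols_alt
    rw [h1, h3]
    unfold pvTable
    rw [← pvSubB_eq]
    simp
  calc add_symbols text = String.ofList (add_symbols text).toList := by simp
    _ = String.ofList (add_symbols_alt text).toList := by rw [hl]
    _ = add_symbols_alt text := by simp
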